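-- pv_equiv track=rewrite | github.com/DeckFilter/DeckyZone | py_modules/runtime_profile_utils.py | remove_gamepad_button_source_mappings
-- ===== SOURCE A (Python) =====
-- def _split_mapping_blocks(profile_yaml):
--     lines = profile_yaml.splitlines()
--     mapping_header_index = None
--     mapping_indent = ""
--
--     for index, line in enumerate(lines):
--         if line.strip() == "mapping:":
--             mapping_header_index = index
--             mapping_indent = line[: len(line) - len(line.lstrip())]
--             break
--
--     if mapping_header_index is None:
--         return profile_yaml, None, None, []
--
--     prefix_lines = lines[: mapping_header_index + 1]
--     suffix_lines = []
--     blocks = []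
--     index = mapping_header_index + 1
--
--     while index < len(lines):
--         line = lines[index]
--         stripped = line.lstrip()
--         indent = line[: len(line) - len(stripped)]
--
--         if (
--             stripped
--             and not stripped.startswith("#")
--             and indent == mapping_indent
--             and not stripped.startswith("-")
--         ):
--             suffix_lines = lines[index:]
--             break
--
--         if stripped.startswith("- name:") and indent == mapping_indent:
--             block_start = index
--             block_indent = indent
--             index += 1
--             while index < len(lines):
--                 next_line = lines[index]
--                 next_stripped = next_line.lstrip()
--                 next_indent = next_line[: len(next_line) - len(next_stripped)]
--                 if next_stripped.startswith("- ") and next_indent == block_indent: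
--                     break
--                 if (
--                     next_stripped
--                     and not next_stripped.startswith("#")
--                     and next_indent == mapping_indent
--                     and not next_stripped.startswith("-")
--                 ):
--                     break
--                 index += 1
--
--             blocks.append(lines[block_start:index])
--             continue
--
--         prefix_lines.append(line)
--         index += 1
--
--     return profile_yaml, prefix_lines, suffix_lines, blocks
--
-- def _join_mapping_blocks(original_profile_yaml, prefix_lines, suffix_lines, blocks):
--     output_lines = list(prefix_lines)
--     for block in blocks:
--         output_lines.extend(block)
--     output_lines.extend(suffix_lines)
--     output = "\n".join(output_lines)
--     if original_profile_yaml.endswith("\n"):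
--         output = f"{output}\n"
--     return output
--
-- def remove_gamepad_button_source_mappings(profile_yaml, button_names):
--     if not profile_yaml or not button_names:
--         return profile_yaml
--
--     original_profile_yaml, prefix_lines, suffix_lines, blocks = _split_mapping_blocks(
--         profile_yaml
--     )
--     if prefix_lines is None:
--         return profile_yaml
--
--     kept_blocks = []
--     needle_lines = {f"button: {button_name}" for button_name in button_names}
--
--     for block in blocks:
--         block_text = "\n".join(line.strip() for line in block)
--         if any(needle in block_text for needle in needle_lines):
--             continue
--         kept_blocks.append(block)
--
--     return _join_mapping_blocks(
--         original_profile_yaml,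
--         prefix_lines,
--         suffix_lines,
--         kept_blocks,
--     )
-- ===== SOURCE B (Python) =====
-- def _label_lines(lines, indent):
--     # flat state machine over the mapping region: tag every line as
--     # 'P' (prefix/misc), 'B' (block start), 'C' (block continuation), 'S' (suffix)
--     pairs = []
--     state = "scan"
--     for line in lines:
--         t = line.lstrip()
--         ind = line[: len(line) - len(t)]
--         if state == "after":
--             pairs.append(("S", line))
--         elif state == "block":
--             if t.startswith("- ") and ind == indent:
--                 if t.startswith("- name:"):
--                     pairs.append(("B", line))
--                 else:
--                     pairs.append(("P", line))
--                     state = "scan"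
--             elif t and not t.startswith("#") and ind == indent and not t.startswith("-"):
--                 pairs.append(("S", line))
--                 state = "after"
--             else:
--                 pairs.append(("C", line))
--         else:  # scan
--             if t and not t.startswith("#") and ind == indent and not t.startswith("-"):
--                 pairs.append(("S", line))
--                 state = "after"
--             elif t.startswith("- name:") and ind == indent:
--                 pairs.append(("B", line))
--                 state = "block"
--             else:
--                 pairs.append(("P", line))
--     return pairs
--
--
-- def _group_blocks(pairs):
--     # blocks are a 'B' line followed by its run of 'C' lines
--     blocks = []
--     i = 0
--     while i < len(pairs):
--         tag, line = pairs[i]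
--         if tag == "B":
--             j = i + 1
--             while j < len(pairs) and pairs[j][0] == "C":
--                 j += 1
--             blocks.append([line] + [l for _, l in pairs[i + 1 : j]])
--             i = j
--         else:
--             i += 1
--     return blocks
--
--
-- def _block_matches(block, button_names):
--     # single scan over the block text for the shared tag "button: ",
--     # then prefix-test the button names at each occurrence
--     text = "\n".join(line.strip() for line in block)
--     pos = text.find("button: ")
--     while pos != -1:
--         tail = text[pos + 8:]
--         if any(tail.startswith(name) for name in button_names):
--             return True
--         pos = text.find("button: ", pos + 1)
--     return False
--
--
-- def remove_gamepad_button_source_mappings(profile_yaml, button_names):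
--     if not profile_yaml or not button_names:
--         return profile_yaml
--
--     lines = profile_yaml.splitlines()
--     header = next(
--         (i for i, line in enumerate(lines) if line.strip() == "mapping:"), None
--     )
--     if header is None:
--         return profile_yaml
--
--     header_line = lines[header]
--     indent = header_line[: len(header_line) - len(header_line.lstrip())]
--
--     pairs = _label_lines(lines[header + 1 :], indent)
--     pre = [l for t, l in pairs if t == "P"]
--     suf = [l for t, l in pairs if t == "S"]
--     blocks = _group_blocks(pairs)
--     kept = [b for b in blocks if not _block_matches(b, button_names)]
--
--     out = "\n".join(
--         lines[: header + 1] + pre + [l for b in kept for l in b] + suf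
--     )
--     if profile_yaml.endswith("\n"):
--         out += "\n"
--     return out
-- ===== Notes on version B (the rewrite author's own statement) =====
-- stated objective: alternative
-- what changed: B replaces A's nested outer/inner indent-parsing loops and block-list splitting by a flat one-line-at-a-time state machine that tags every line (prefix/block-start/block-continuation/suffix), then derives the kept output by grouping and filtering the tagged lines in separate staged passes; the per-block test scans the block text once for the shared tag 'button: ' with a name-prefix test instead of one full substring scan per button name.
import Mathlib
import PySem

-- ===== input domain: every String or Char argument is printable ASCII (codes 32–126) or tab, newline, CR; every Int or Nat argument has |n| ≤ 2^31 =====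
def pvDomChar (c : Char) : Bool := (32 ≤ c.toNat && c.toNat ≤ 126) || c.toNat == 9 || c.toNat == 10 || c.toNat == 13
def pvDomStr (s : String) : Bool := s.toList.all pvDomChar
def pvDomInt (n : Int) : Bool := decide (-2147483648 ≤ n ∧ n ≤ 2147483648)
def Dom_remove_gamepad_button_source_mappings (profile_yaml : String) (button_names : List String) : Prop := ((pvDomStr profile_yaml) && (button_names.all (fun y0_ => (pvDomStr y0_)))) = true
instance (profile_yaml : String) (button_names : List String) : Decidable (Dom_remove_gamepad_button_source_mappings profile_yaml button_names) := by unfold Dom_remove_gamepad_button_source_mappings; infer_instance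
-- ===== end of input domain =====

-- B replaces A's nested outer/inner indent-parsing loops and block-list splitting by a flat
-- per-line state machine that TAGS every line of the mapping region (prefix / block-start /
-- block-continuation / suffix) and then derives the output by staged passes (filter the tags,
-- group the blocks, filter the blocks); the per-block test scans the block text once for the
-- shared tag "button: " with a name-prefix test instead of one substring scan per button name
-- (objective: alternative).

-- shared trivial helper: Python's  line[: len(line) - len(line.lstrip())]  (exact: the bound is in [0, len])
def pvIndentOf (l : List Char) : List Char :=
  l.take (l.length - (PySem.Chars.lstrip l).length)

-- ===== PORT A =====

-- A: the header-finding for-loop of _split_mapping_blocks: first line whose strip() == "mapping:";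
-- returns (lines[: header+1], mapping_indent, lines[header+1 :])
def pvAFindHeader : List (List Char) → Option (List (List Char) × List Char × List (List Char))
  | [] => none
  | l :: ls =>
    if PySem.Chars.strip l == "mapping:".toList then
      some ([l], pvIndentOf l, ls)
    else
      match pvAFindHeader ls with
      | none => none
      | some (p, ind, rest) => some (l :: p, ind, rest)

-- A: the inner while-loop (consume the lines of a block after its "- name:" line);
-- returns (block tail, remaining lines)
def pvAConsume (mindent bindent : List Char) : List (List Char) → List (List Char) × List (List Char)
  | [] => ([], [])
  | l :: ls =>
    let st := PySem.Chars.lstrip l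
    let ind := pvIndentOf l
    if PySem.Chars.startswith st "- ".toList && ind == bindent then ([], l :: ls)
    else if !st.isEmpty && !PySem.Chars.startswith st "#".toList && ind == mindent && !PySem.Chars.startswith st "-".toList then ([], l :: ls)
    else
      let br := pvAConsume mindent bindent ls
      (l :: br.1, br.2)

theorem pvAConsume_snd_length (mindent bindent : List Char) (ls : List (List Char)) :
    (pvAConsume mindent bindent ls).2.length ≤ ls.length := by
  induction ls with
  | nil => simp [pvAConsume]
  | cons l ls ih =>
    simp only [pvAConsume]
    split
    · simp
    · split
      · simp
      · simpa using Nat.le_succ_of_le ih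

-- A: the outer while-loop of _split_mapping_blocks; returns (appended prefix lines, suffix lines, blocks)
def pvAScan (mindent : List Char) (rest : List (List Char)) :
    List (List Char) × List (List Char) × List (List (List Char)) :=
  match rest with
  | [] => ([], [], [])
  | l :: ls =>
    let st := PySem.Chars.lstrip l
    let ind := pvIndentOf l
    if !st.isEmpty && !PySem.Chars.startswith st "#".toList && ind == mindent && !PySem.Chars.startswith st "-".toList then
      ([], l :: ls, [])
    else if PySem.Chars.startswith st "- name:".toList && ind == mindent then
      let br := pvAConsume mindent ind ls
      let psb := pvAScan mindent br.2
      (psb.1, psb.2.1, (l :: br.1) :: psb.2.2)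
    else
      let psb := pvAScan mindent ls
      (l :: psb.1, psb.2.1, psb.2.2)
  termination_by rest.length
  decreasing_by
  · exact Nat.lt_succ_of_le (pvAConsume_snd_length _ _ _)
  · simp

def remove_gamepad_button_source_mappings (profile_yaml : String) (button_names : List String) : String :=
  if profile_yaml.toList.isEmpty || button_names.isEmpty then profile_yaml
  else
    let lines := PySem.Chars.splitlines profile_yaml.toList
    match pvAFindHeader lines with
    | none => profile_yaml
    | some (pfx, mindent, rest) =>
      let psb := pvAScan mindent rest
      let prefix_lines := pfx ++ psb.1
      let suffix_lines := psb.2.1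
      let blocks := psb.2.2
      let needle_lines : PySem.Set (List Char) :=
        PySem.Set.ofList (button_names.map (fun nm => "button: ".toList ++ nm.toList))
      let kept_blocks := blocks.filter (fun b =>
        let block_text := PySem.Chars.join ['\n'] (b.map PySem.Chars.strip)
        !(needle_lines.any (fun needle => PySem.Chars.isIn needle block_text)))
      let output_lines := prefix_lines ++ kept_blocks.flatten ++ suffix_lines
      let output := PySem.Chars.join ['\n'] output_lines
      String.ofList (if PySem.Chars.endswith profile_yaml.toList ['\n'] then output ++ ['\n'] else output)

-- ===== PORT B =====

inductive PvTag : Type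
  | P | S | B | C
  deriving DecidableEq, Repr

inductive PvSt : Type
  | scan | block | after
  deriving DecidableEq, Repr

-- B: the flat state machine of _label_lines: one tag per line, no nested loop
def pvBLabel (indent : List Char) : PvSt → List (List Char) → List (PvTag × List Char)
  | _, [] => []
  | .after, l :: ls => (.S, l) :: pvBLabel indent .after ls
  | .block, l :: ls =>
    let t := PySem.Chars.lstrip l
    let ind := pvIndentOf l
    if PySem.Chars.startswith t "- ".toList && ind == indent then
      if PySem.Chars.startswith t "- name:".toList then (.B, l) :: pvBLabel indent .block ls
      else (.P, l) :: pvBLabel indent .scan ls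
    else if !t.isEmpty && !PySem.Chars.startswith t "#".toList && ind == indent && !PySem.Chars.startswith t "-".toList then
      (.S, l) :: pvBLabel indent .after ls
    else (.C, l) :: pvBLabel indent .block ls
  | .scan, l :: ls =>
    let t := PySem.Chars.lstrip l
    let ind := pvIndentOf l
    if !t.isEmpty && !PySem.Chars.startswith t "#".toList && ind == indent && !PySem.Chars.startswith t "-".toList then
      (.S, l) :: pvBLabel indent .after ls
    else if PySem.Chars.startswith t "- name:".toList && ind == indent then
      (.B, l) :: pvBLabel indent .block ls
    else (.P, l) :: pvBLabel indent .scan ls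

-- B: _group_blocks: a block is a 'B' line followed by its run of 'C' lines
def pvGroup : List (PvTag × List Char) → List (List (List Char))
  | [] => []
  | (t, l) :: rest =>
    if t == PvTag.B then
      (l :: (rest.takeWhile (fun p => p.1 == PvTag.C)).map Prod.snd)
        :: pvGroup (rest.dropWhile (fun p => p.1 == PvTag.C))
    else pvGroup rest
  termination_by ps => ps.length
  decreasing_by
  · exact Nat.lt_succ_of_le (List.dropWhile_sublist _).length_le
  · simp

-- B: the find-loop of _block_matches: scan text for "button: " from position `start`,
-- prefix-testing the names at each occurrence; fuel = text.length + 1 - start bounds the loop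
def pvBMatchGo (text : List Char) (names : List String) : Nat → Nat → Bool
  | 0, _ => false
  | fuel + 1, start =>
    let p := PySem.Chars.findFrom text "button: ".toList (start : Int) none
    if p == -1 then false
    else if names.any (fun nm => PySem.Chars.startswith (text.drop (p.toNat + 8)) nm.toList) then true
    else pvBMatchGo text names fuel (p.toNat + 1)

def pvBMatches (block : List (List Char)) (names : List String) : Bool :=
  let text := PySem.Chars.join ['\n'] (block.map PySem.Chars.strip)
  pvBMatchGo text names (text.length + 1) 0

def remove_gamepad_button_source_mappings_alt (profile_yaml : String) (button_names : List String) : String :=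
  if profile_yaml.toList.isEmpty || button_names.isEmpty then profile_yaml
  else
    let lines := PySem.Chars.splitlines profile_yaml.toList
    match lines.findIdx? (fun l => PySem.Chars.strip l == "mapping:".toList) with
    | none => profile_yaml
    | some header =>
      let indent := pvIndentOf (lines.getD header [])
      let pairs := pvBLabel indent .scan (lines.drop (header + 1))
      let pre := (pairs.filter (fun p => p.1 == PvTag.P)).map Prod.snd
      let suf := (pairs.filter (fun p => p.1 == PvTag.S)).map Prod.snd
      let blocks := pvGroup pairs
      let kept := blocks.filter (fun b => !pvBMatches b button_names)
      let out := PySem.Chars.join ['\n'] (lines.take (header + 1) ++ pre ++ kept.flatten ++ suf)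
      String.ofList (if PySem.Chars.endswith profile_yaml.toList ['\n'] then out ++ ['\n'] else out)

-- ===== PRECONDITION & SPEC =====
def Spec_remove_gamepad_button_source_mappings (profile_yaml : String) (button_names : List String) (out : String) : Prop := out = remove_gamepad_button_source_mappings_alt profile_yaml button_names
instance (profile_yaml : String) (button_names : List String) (out : String) : Decidable (Spec_remove_gamepad_button_source_mappings profile_yaml button_names out) := by unfold Spec_remove_gamepad_button_source_mappings; infer_instance

-- ===== CLAIM (what is proved, stated in full; the proofs are below) =====
def Claim_equal_remove_gamepad_button_source_mappings : Prop := ∀ (profile_yaml : String) (button_names : List String), Dom_remove_gamepad_button_source_mappings profile_yaml button_names → Spec_remove_gamepad_button_source_mappings profile_yaml button_names (remove_gamepad_button_source_mappings profile_yaml button_names)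

-- ===== LEMMAS AND PROOFS =====

-- a ++ b is a prefix of l iff a is and b is a prefix of the rest
theorem pvAppend_prefix_iff (a b l : List Char) :
    (a ++ b <+: l) ↔ a <+: l ∧ b <+: l.drop a.length := by
  constructor
  · rintro ⟨t, ht⟩
    subst ht
    refine ⟨⟨b ++ t, by simp⟩, ?_⟩
    simp
  · rintro ⟨⟨t, ht⟩, hb⟩
    subst ht
    rcases hb with ⟨u, hu⟩
    rw [List.drop_left] at hu
    exact ⟨u, by rw [List.append_assoc, hu]⟩

-- characterisation of B's find-loop
theorem pvBMatchGo_iff (text : List Char) (names : List String) (fuel start : Nat)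
    (hs : start ≤ text.length) (hf : text.length + 1 ≤ fuel + start) :
    pvBMatchGo text names fuel start = true ↔
      ∃ j, start ≤ j ∧ "button: ".toList <+: text.drop j ∧
        ∃ nm ∈ names, nm.toList <+: text.drop (j + 8) := by
  induction fuel generalizing start with
  | zero => omega
  | succ fuel ih =>
    simp only [pvBMatchGo]
    set p := PySem.Chars.findFrom text "button: ".toList (start : Int) none with hp
    by_cases hneg : p = -1
    · have hnone := (PySem.Chars.findFrom_natCast_eq_neg_one_iff text "button: ".toList start hs).mp (by rw [← hp]; exact hneg)
      simp only [hneg, beq_self_eq_true, if_true]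
      constructor
      · intro h; exact absurd h (by simp)
      · rintro ⟨j, hj, hpre, -⟩
        exfalso; apply hnone
        have h2 : "button: ".toList <+: (text.drop start).drop (j - start) := by
          rw [List.drop_drop]
          have : start + (j - start) = j := by omega
          rwa [this]
        exact h2.isInfix.trans (List.drop_suffix _ _).isInfix
    · have hspec := PySem.Chars.findFrom_natCast_spec text "button: ".toList start hs (by rw [← hp]; exact hneg)
      obtain ⟨hle, hocc, hmin⟩ := hspec
      rw [← hp] at hle hocc hmin
      have hpne : (p == -1) = false := by simp [hneg]
      rw [hpne]
      simp only [Bool.false_eq_true, if_false]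
      have hstartle : start ≤ p.toNat := by omega
      have hplen : p.toNat + 8 ≤ text.length := by
        have := hocc.length_le
        simp [List.length_drop] at this
        have h8 : ("button: ".toList).length = 8 := by decide
        omega
      by_cases hany : names.any (fun nm => PySem.Chars.startswith (text.drop (p.toNat + 8)) nm.toList) = true
      · rw [hany]
        simp only [if_true, true_iff]
        rw [List.any_eq_true] at hany
        obtain ⟨nm, hnm, hsw⟩ := hany
        exact ⟨p.toNat, hstartle, hocc, nm, hnm, (PySem.Chars.startswith_iff _ _).mp hsw⟩
      · simp only [hany, if_false, Bool.false_eq_true]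
        rw [ih (p.toNat + 1) (by omega) (by omega)]
        constructor
        · rintro ⟨j, hj, h1, h2⟩; exact ⟨j, by omega, h1, h2⟩
        · rintro ⟨j, hj, h1, h2⟩
          refine ⟨j, ?_, h1, h2⟩
          rcases Nat.lt_or_ge j (p.toNat + 1) with hlt | hge
          · rcases Nat.lt_or_ge j p.toNat with hlt2 | hge2
            · exact absurd h1 (hmin j hj hlt2)
            · have : j = p.toNat := by omega
              subst this
              exfalso
              obtain ⟨nm, hnm, hpre⟩ := h2
              apply hany
              rw [List.any_eq_true]
              exact ⟨nm, hnm, (PySem.Chars.startswith_iff _ _).mpr hpre⟩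
          · exact hge

-- A's needle-set test and B's scan agree on every block
theorem pvMatch_eq (b : List (List Char)) (names : List String) :
    (PySem.Set.ofList (names.map (fun nm => "button: ".toList ++ nm.toList))).any
        (fun needle => PySem.Chars.isIn needle (PySem.Chars.join ['\n'] (b.map PySem.Chars.strip)))
      = pvBMatches b names := by
  set t := PySem.Chars.join ['\n'] (b.map PySem.Chars.strip) with ht
  have h8 : ("button: ".toList).length = 8 := by decide
  rw [Bool.eq_iff_iff]
  rw [List.any_eq_true]
  unfold pvBMatches
  rw [← ht, pvBMatchGo_iff t names (t.length + 1) 0 (by omega) (by omega)]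
  constructor
  · rintro ⟨nd, hnd, hin⟩
    rw [PySem.Set.mem_ofList, List.mem_map] at hnd
    obtain ⟨nm, hnm, rfl⟩ := hnd
    rw [← PySem.Chars.exists_prefix_drop_iff_isIn] at hin
    obtain ⟨j, hj⟩ := hin
    rw [pvAppend_prefix_iff, h8] at hj
    rw [List.drop_drop] at hj
    exact ⟨j, Nat.zero_le _, hj.1, nm, hnm, hj.2⟩
  · rintro ⟨j, -, htag, nm, hnm, hpre⟩
    refine ⟨"button: ".toList ++ nm.toList, ?_, ?_⟩
    · rw [PySem.Set.mem_ofList, List.mem_map]; exact ⟨nm, hnm, rfl⟩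
    · rw [← PySem.Chars.exists_prefix_drop_iff_isIn]
      refine ⟨j, ?_⟩
      rw [pvAppend_prefix_iff, h8, List.drop_drop]
      exact ⟨htag, by simpa [Nat.add_comm j 8] using hpre⟩

-- the 'after' state tags everything 'S'
theorem pvBLabel_after (indent : List Char) (ls : List (List Char)) :
    pvBLabel indent .after ls = ls.map (fun l => (PvTag.S, l)) := by
  induction ls with
  | nil => rfl
  | cons l ls ih => simp [pvBLabel, ih]

-- "- " is a prefix of t → "-" is (and contrapositive), in Bool form
theorem pvStarts_dash (t : List Char) (h : PySem.Chars.startswith t "- ".toList = true) :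
    PySem.Chars.startswith t "-".toList = true := by
  rw [PySem.Chars.startswith_iff] at h ⊢
  exact List.IsPrefix.trans (by decide) h

-- the 'block' state tags exactly A's inner-loop consume as 'C' and then behaves as 'scan'
theorem pvBLabel_block (indent : List Char) (ls : List (List Char)) :
    pvBLabel indent .block ls =
      (pvAConsume indent indent ls).1.map (fun l => (PvTag.C, l))
        ++ pvBLabel indent .scan (pvAConsume indent indent ls).2 := by
  induction ls with
  | nil => rfl
  | cons l ls ih =>
    by_cases h1 : (PySem.Chars.startswith (PySem.Chars.lstrip l) "- ".toList && pvIndentOf l == indent) = true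
    · have hA : pvAConsume indent indent (l :: ls) = ([], l :: ls) := by
        simp only [pvAConsume]; rw [if_pos h1]
      rw [hA]
      simp only [List.map_nil, List.nil_append]
      have hdash : PySem.Chars.startswith (PySem.Chars.lstrip l) "-".toList = true :=
        pvStarts_dash _ (Bool.and_eq_true_iff.mp h1).1
      have hnd : (!PySem.Chars.startswith (PySem.Chars.lstrip l) "-".toList) = false := by
        rw [hdash]; rfl
      have hterm : (!(PySem.Chars.lstrip l).isEmpty && !PySem.Chars.startswith (PySem.Chars.lstrip l) "#".toList && pvIndentOf l == indent && !PySem.Chars.startswith (PySem.Chars.lstrip l) "-".toList) = false := by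
        rw [hnd, Bool.and_false]
      by_cases h2 : PySem.Chars.startswith (PySem.Chars.lstrip l) "- name:".toList = true
      · have hind : (pvIndentOf l == indent) = true := (Bool.and_eq_true_iff.mp h1).2
        simp only [pvBLabel]
        rw [if_pos h1, if_pos h2, if_neg (by rw [hterm]; exact Bool.false_ne_true),
          if_pos (by rw [h2, hind]; rfl)]
      · have h2f : PySem.Chars.startswith (PySem.Chars.lstrip l) "- name:".toList = false :=
          Bool.eq_false_iff.mpr h2
        simp only [pvBLabel]
        rw [if_pos h1, if_neg h2, if_neg (by rw [hterm]; exact Bool.false_ne_true),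
          if_neg (by rw [h2f, Bool.false_and]; exact Bool.false_ne_true)]
    · by_cases h2 : (!(PySem.Chars.lstrip l).isEmpty && !PySem.Chars.startswith (PySem.Chars.lstrip l) "#".toList && pvIndentOf l == indent && !PySem.Chars.startswith (PySem.Chars.lstrip l) "-".toList) = true
      · have hA : pvAConsume indent indent (l :: ls) = ([], l :: ls) := by
          simp only [pvAConsume]; rw [if_neg h1, if_pos h2]
        rw [hA]
        simp only [List.map_nil, List.nil_append]
        simp only [pvBLabel]
        rw [if_neg h1, if_pos h2, if_pos h2]
      · have hA : pvAConsume indent indent (l :: ls) =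
            (l :: (pvAConsume indent indent ls).1, (pvAConsume indent indent ls).2) := by
          simp only [pvAConsume]; rw [if_neg h1, if_neg h2]
        rw [hA]
        simp only [pvBLabel]
        rw [if_neg h1, if_neg h2, ih]
        simp

-- the first tag the 'scan' state emits is never 'C'
theorem pvBLabel_scan_headC (indent : List Char) (ls : List (List Char)) :
    (pvBLabel indent .scan ls).takeWhile (fun p => p.1 == PvTag.C) = [] ∧
    (pvBLabel indent .scan ls).dropWhile (fun p => p.1 == PvTag.C) = pvBLabel indent .scan ls := by
  cases ls with
  | nil => exact ⟨rfl, rfl⟩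
  | cons l ls =>
    simp only [pvBLabel]
    split
    · exact ⟨rfl, rfl⟩
    · split
      · exact ⟨rfl, rfl⟩
      · exact ⟨rfl, rfl⟩

theorem pvTakeWhile_append_all {α : Type} (p : α → Bool) (a b : List α)
    (h : ∀ x ∈ a, p x = true) :
    (a ++ b).takeWhile p = a ++ b.takeWhile p ∧ (a ++ b).dropWhile p = b.dropWhile p := by
  induction a with
  | nil => simp
  | cons x a ih =>
    have hx := h x (by simp)
    have ihh := ih (fun y hy => h y (by simp [hy]))
    simp [hx, ihh.1, ihh.2]

theorem pvGroup_mapS (ls : List (List Char)) :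
    pvGroup (ls.map (fun l => (PvTag.S, l))) = [] := by
  induction ls with
  | nil => simp [pvGroup]
  | cons x xs ih => simp [pvGroup, ih]

-- the main correspondence: filtering / grouping B's tagged lines computes A's three outputs
theorem pvLbl_eq (indent : List Char) (rest : List (List Char)) :
    ((pvBLabel indent .scan rest).filter (fun p => p.1 == PvTag.P)).map Prod.snd = (pvAScan indent rest).1 ∧
    ((pvBLabel indent .scan rest).filter (fun p => p.1 == PvTag.S)).map Prod.snd = (pvAScan indent rest).2.1 ∧
    pvGroup (pvBLabel indent .scan rest) = (pvAScan indent rest).2.2 := by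
  fun_induction pvAScan indent rest with
  | case1 => simp [pvBLabel, pvGroup]
  | case2 l ls st ind h1 =>
    simp only [pvBLabel]
    rw [if_pos h1, pvBLabel_after]
    refine ⟨?_, ?_, ?_⟩
    · simp [List.filter_map, Function.comp_def]
    · simp [List.filter_map, Function.comp_def]
    · simp [pvGroup, pvGroup_mapS]
  | case3 l ls st ind h1 h2 br psb ih =>
    have hind : ind = indent := by
      have h := h2
      simp only [Bool.and_eq_true, beq_iff_eq] at h
      exact h.2
    have hbr : pvAConsume indent indent ls = br := by
      show pvAConsume indent indent ls = pvAConsume indent ind ls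
      rw [hind]
    simp only [pvBLabel]
    rw [if_neg h1, if_pos h2, pvBLabel_block, hbr]
    have hall : ∀ x ∈ br.1.map (fun l => (PvTag.C, l)), (fun p => p.1 == PvTag.C) x = true := by
      intro x hx
      rw [List.mem_map] at hx
      obtain ⟨y, -, rfl⟩ := hx
      rfl
    obtain ⟨htw, hdw⟩ := pvTakeWhile_append_all (fun p => p.1 == PvTag.C) _ (pvBLabel indent .scan br.2) hall
    obtain ⟨hc1, hc2⟩ := pvBLabel_scan_headC indent br.2
    refine ⟨?_, ?_, ?_⟩
    · rw [List.filter_cons_of_neg (by simp), List.filter_append]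
      rw [show (br.1.map (fun l => (PvTag.C, l))).filter (fun p => p.1 == PvTag.P) = [] by
        simp [List.filter_map, Function.comp_def]]
      simpa using ih.1
    · rw [List.filter_cons_of_neg (by simp), List.filter_append]
      rw [show (br.1.map (fun l => (PvTag.C, l))).filter (fun p => p.1 == PvTag.S) = [] by
        simp [List.filter_map, Function.comp_def]]
      simpa using ih.2.1
    · simp only [pvGroup]
      rw [if_pos (by simp), htw, hc1, hdw, hc2, ih.2.2]
      simp only [List.map_map, Function.comp_def, List.append_nil, List.map_id_fun']
      rfl
  | case4 l ls st ind h1 h2 psb ih =>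
    simp only [pvBLabel]
    rw [if_neg h1, if_neg h2]
    refine ⟨?_, ?_, ?_⟩
    · rw [List.filter_cons_of_pos (by simp)]
      simpa using ih.1
    · rw [List.filter_cons_of_neg (by simp)]
      exact ih.2.1
    · simp only [pvGroup]
      rw [if_neg (by simp)]
      exact ih.2.2

-- A's header loop = findIdx? + take/drop
theorem pvFindHeader_eq (lines : List (List Char)) :
    pvAFindHeader lines =
      (lines.findIdx? (fun l => PySem.Chars.strip l == "mapping:".toList)).map
        (fun i => (lines.take (i + 1), pvIndentOf (lines.getD i []), lines.drop (i + 1))) := by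
  induction lines with
  | nil => rfl
  | cons l ls ih =>
    simp only [pvAFindHeader, List.findIdx?_cons]
    by_cases h : (PySem.Chars.strip l == "mapping:".toList) = true
    · have he : PySem.Chars.strip l = "mapping:".toList := by simpa using h
      simp [he]
    · simp only [h, Bool.false_eq_true, if_false, ih]
      cases hf : List.findIdx? (fun l => PySem.Chars.strip l == "mapping:".toList) ls with
      | none => simp
      | some i => simp

-- ===== VERDICT (by name: the statement is the Claim_ definition above) =====
theorem remove_gamepad_button_source_mappings_spec : Claim_equal_remove_gamepad_button_source_mappings := by
  unfold Claim_equal_remove_gamepad_button_source_mappings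
  intro profile_yaml button_names _
  unfold Spec_remove_gamepad_button_source_mappings
  unfold remove_gamepad_button_source_mappings remove_gamepad_button_source_mappings_alt
  by_cases hg : (profile_yaml.toList.isEmpty || button_names.isEmpty) = true
  · rw [if_pos hg, if_pos hg]
  · rw [if_neg hg, if_neg hg]
    simp only [pvFindHeader_eq]
    cases hf : (PySem.Chars.splitlines profile_yaml.toList).findIdx?
        (fun l => PySem.Chars.strip l == "mapping:".toList) with
    | none => rfl
    | some i =>
      simp only [Option.map_some]
      obtain ⟨e1, e2, e3⟩ := pvLbl_eq (pvIndentOf ((PySem.Chars.splitlines profile_yaml.toList).getD i []))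
        ((PySem.Chars.splitlines profile_yaml.toList).drop (i + 1))
      simp only [pvMatch_eq, e1, e2, e3, List.append_assoc]
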